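-- pv_equiv track=rewrite | github.com/Seanaaa0/GPT-CoT | source/train_simple.py | simple_greedy_policy
-- ===== SOURCE A (Python) =====
-- def simple_greedy_policy(start, goal):
--     path = []
--     x, y = start
--     gx, gy = goal
--
--     while x != gx:
--         if gx > x:
--             x += 1
--             path.append("(+1,0)")
--         else:
--             x -= 1
--             path.append("(-1,0)")
--
--     while y != gy:
--         if gy > y:
--             y += 1
--             path.append("(0,+1)")
--         else:
--             y -= 1
--             path.append("(0,-1)")
--
--     return path
-- ===== SOURCE B (Python) =====
-- def simple_greedy_policy(start, goal):
--     x, y = start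
--     gx, gy = goal
--     dx = gx - x
--     dy = gy - y
--     xs = ["(+1,0)"] * dx if dx > 0 else ["(-1,0)"] * (-dx)
--     ys = ["(0,+1)"] * dy if dy > 0 else ["(0,-1)"] * (-dy)
--     return xs + ys
-- ===== Notes on version B (the rewrite author's own statement) =====
-- stated objective: simpler
-- what changed: Replaces the two per-step while/append loops with a closed-form construction: compute dx, dy once and build each leg by list multiplication, so no stepping loop remains.
import Mathlib
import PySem

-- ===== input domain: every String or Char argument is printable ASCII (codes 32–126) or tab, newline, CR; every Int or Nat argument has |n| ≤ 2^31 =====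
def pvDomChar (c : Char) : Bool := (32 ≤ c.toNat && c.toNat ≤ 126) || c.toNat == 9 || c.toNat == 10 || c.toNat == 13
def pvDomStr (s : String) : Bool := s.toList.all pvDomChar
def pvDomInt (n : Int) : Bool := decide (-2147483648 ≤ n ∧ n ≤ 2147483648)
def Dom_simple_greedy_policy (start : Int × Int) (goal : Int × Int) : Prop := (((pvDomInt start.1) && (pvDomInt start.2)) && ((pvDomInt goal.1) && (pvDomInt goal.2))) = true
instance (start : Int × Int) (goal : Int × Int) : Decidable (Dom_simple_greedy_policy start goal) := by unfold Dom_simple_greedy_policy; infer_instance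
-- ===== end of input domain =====

-- B builds each leg in closed form (list multiplication from dx, dy) instead of A's per-step while/append loops; objective: simpler.

-- ===== PORT A =====
-- each 'while pos != target' loop of A, stepping ±1 and appending the matching move string
def pvLegLoop (pos target : Int) (plus minus : String) : List String :=
  if _h : pos ≠ target then
    if target > pos then plus :: pvLegLoop (pos + 1) target plus minus
    else minus :: pvLegLoop (pos - 1) target plus minus
  else []
termination_by (target - pos).natAbs
decreasing_by all_goals omega

def simple_greedy_policy (start : Int × Int) (goal : Int × Int) : List String :=
  let x := start.1; let y := start.2
  let gx := goal.1; let gy := goal.2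
  pvLegLoop x gx "(+1,0)" "(-1,0)" ++ pvLegLoop y gy "(0,+1)" "(0,-1)"

-- ===== PORT B =====
def simple_greedy_policy_alt (start : Int × Int) (goal : Int × Int) : List String :=
  let dx := goal.1 - start.1
  let dy := goal.2 - start.2
  let xs := if dx > 0 then List.replicate dx.toNat "(+1,0)" else List.replicate (-dx).toNat "(-1,0)"
  let ys := if dy > 0 then List.replicate dy.toNat "(0,+1)" else List.replicate (-dy).toNat "(0,-1)"
  xs ++ ys

-- ===== PRECONDITION & SPEC =====
def Spec_simple_greedy_policy (start : Int × Int) (goal : Int × Int) (out : List String) : Prop := out = simple_greedy_policy_alt start goal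
instance (start : Int × Int) (goal : Int × Int) (out : List String) : Decidable (Spec_simple_greedy_policy start goal out) := by unfold Spec_simple_greedy_policy; infer_instance

-- ===== CLAIM (what is proved, stated in full; the proofs are below) =====
def Claim_equal_simple_greedy_policy : Prop := ∀ (start : Int × Int) (goal : Int × Int), Dom_simple_greedy_policy start goal → Spec_simple_greedy_policy start goal (simple_greedy_policy start goal)

-- ===== LEMMAS AND PROOFS =====
theorem pvLegLoop_up (d : Nat) (x : Int) (p m : String) :
    pvLegLoop x (x + d) p m = List.replicate d p := by
  induction d generalizing x with
  | zero => unfold pvLegLoop; simp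
  | succ n ih =>
      unfold pvLegLoop
      have h1 : x ≠ x + ((n : Int) + 1) := by omega
      have h2 : x + ((n : Int) + 1) > x := by omega
      simp only [Nat.cast_add, Nat.cast_one, h1, h2, dif_pos, if_pos, ne_eq,
        not_false_eq_true]
      have : x + ((n : Int) + 1) = (x + 1) + (n : Int) := by ring
      rw [this, ih]
      rfl

theorem pvLegLoop_down (d : Nat) (x : Int) (p m : String) :
    pvLegLoop x (x - d) p m = List.replicate d m := by
  induction d generalizing x with
  | zero => unfold pvLegLoop; simp
  | succ n ih =>
      unfold pvLegLoop
      have h1 : x ≠ x - ((n : Int) + 1) := by omega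
      have h2 : ¬ (x - ((n : Int) + 1) > x) := by omega
      simp only [Nat.cast_add, Nat.cast_one, h1, h2, ne_eq, not_false_eq_true,
        dif_pos, if_neg]
      have : x - ((n : Int) + 1) = (x - 1) - (n : Int) := by ring
      rw [this, ih]
      rfl

theorem pvLegLoop_eq (x t : Int) (p m : String) :
    pvLegLoop x t p m =
      (if t - x > 0 then List.replicate (t - x).toNat p
       else List.replicate (-(t - x)).toNat m) := by
  by_cases h : x ≤ t
  · have hx : t = x + ((t - x).toNat : Int) := by omega
    rw [hx, pvLegLoop_up]
    rcases eq_or_lt_of_le h with he | hl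
    · subst he; simp
    · have : x + ((t - x).toNat : Int) - x > 0 := by omega
      rw [if_pos this]
      congr 1
      omega
  · have h' : t < x := by omega
    have hx : t = x - ((x - t).toNat : Int) := by omega
    rw [hx, pvLegLoop_down]
    have : ¬ (x - ((x - t).toNat : Int) - x > 0) := by omega
    rw [if_neg this]
    congr 1
    omega

-- ===== VERDICT (by name: the statement is the Claim_ definition above) =====
theorem simple_greedy_policy_spec : Claim_equal_simple_greedy_policy := by
  intro start goal _
  unfold Spec_simple_greedy_policy simple_greedy_policy simple_greedy_policy_alt
  simp only [pvLegLoop_eq]
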